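-- pv_equiv track=rewrite | github.com/f2re/isd_parser | newdataset_roma.py | check_mas
-- ===== SOURCE A (Python) =====
-- def check_mas(mas):
--     k=0
--     for x in mas:
--         if x == None:
--             k+=1
--     if k== len(mas):
--         return False
--     else:
--         return True
-- ===== SOURCE B (Python) =====
-- def check_mas(mas):
--     # True unless mas is exactly the all-None list of its own length:
--     # compare against the canonical all-None list instead of scanning with a counter.
--     return mas != [None] * len(mas)
-- ===== Notes on version B (the rewrite author's own statement) =====
-- stated objective: alternative
-- what changed: Replaces the count-Nones-and-compare-to-len loop by a whole-list comparison: B builds the canonical all-None list of the same length and returns whether mas differs from it, so B maintains no counter and contains no element loop (the comparison runs in C).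
import Mathlib
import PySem

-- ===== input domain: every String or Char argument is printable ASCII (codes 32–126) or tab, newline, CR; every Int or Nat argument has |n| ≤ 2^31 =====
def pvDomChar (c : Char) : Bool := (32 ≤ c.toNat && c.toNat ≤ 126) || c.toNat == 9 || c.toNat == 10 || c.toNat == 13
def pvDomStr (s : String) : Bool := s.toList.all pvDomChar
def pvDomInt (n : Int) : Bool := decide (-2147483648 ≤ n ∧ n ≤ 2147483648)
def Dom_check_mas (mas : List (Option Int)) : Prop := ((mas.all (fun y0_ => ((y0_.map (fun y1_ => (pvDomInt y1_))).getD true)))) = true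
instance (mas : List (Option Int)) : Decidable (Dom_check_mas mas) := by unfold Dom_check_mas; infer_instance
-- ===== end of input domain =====

-- B replaces A's count-Nones-then-compare-to-len loop by a whole-list comparison against the canonical all-None list (alternative; same cost).

-- ===== PORT A =====
-- k = 0; for x in mas: if x == None: k += 1; return not (k == len(mas))
def check_mas (mas : List (Option Int)) : Bool :=
  let k := mas.foldl (fun k x => if x = none then k + 1 else k) (0 : Int)
  if k = (mas.length : Int) then false else true

-- ===== PORT B =====
-- return mas != [None] * len(mas)
def check_mas_alt (mas : List (Option Int)) : Bool :=
  decide (mas ≠ List.replicate mas.length none)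

-- ===== PRECONDITION & SPEC =====
def Spec_check_mas (mas : List (Option Int)) (out : Bool) : Prop := out = check_mas_alt mas
instance (mas : List (Option Int)) (out : Bool) : Decidable (Spec_check_mas mas out) := by unfold Spec_check_mas; infer_instance

-- ===== CLAIM =====
def Claim_equal_check_mas : Prop := ∀ (mas : List (Option Int)), Dom_check_mas mas → Spec_check_mas mas (check_mas mas)

-- ===== LEMMAS AND PROOFS =====
-- loop invariant: A's counter counts the none elements
theorem check_mas_count (mas : List (Option Int)) (k : Int) :
    mas.foldl (fun k x => if x = none then k + 1 else k) k
      = k + (mas.countP (fun x => x = none) : Int) := by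
  induction mas generalizing k with
  | nil => simp
  | cons x xs ih =>
    simp only [List.foldl_cons, List.countP_cons, ih]
    split_ifs <;> simp_all <;> push_cast <;> ring

theorem check_mas_eq (mas : List (Option Int)) : check_mas mas = check_mas_alt mas := by
  unfold check_mas check_mas_alt
  rw [check_mas_count]
  simp only [zero_add]
  by_cases hrep : mas = List.replicate mas.length none
  · have hall : ∀ x ∈ mas, x = none := by
      intro x hx
      exact List.eq_of_mem_replicate (hrep ▸ hx)
    have hc : mas.countP (fun x => x = none) = mas.length :=
      (List.countP_eq_length (p := fun x => decide (x = none)) (l := mas)).mpr (by simpa using hall)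
    rw [if_pos (by exact_mod_cast hc)]
    exact (decide_eq_false (not_not_intro hrep)).symm
  · have hall : ¬ ∀ x ∈ mas, x = none := by
      intro hall
      exact hrep (List.eq_replicate_of_mem hall)
    have hc : mas.countP (fun x => x = none) ≠ mas.length := by
      intro hc
      exact hall (by simpa using (List.countP_eq_length (p := fun x => decide (x = none)) (l := mas)).mp hc)
    rw [if_neg (by exact_mod_cast hc)]
    exact (decide_eq_true hrep).symm

-- ===== VERDICT =====
theorem check_mas_spec : Claim_equal_check_mas := by
  intro mas _
  unfold Spec_check_mas
  exact check_mas_eq mas
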